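-- pv_equiv track=rewrite | github.com/event-driven-robotics/snowball | scripts/busify_wrapper.py | header_port_order
-- ===== SOURCE A (Python) =====
-- from typing import Dict, Tuple, List, Set
--
-- def skeleton_to_busbase(skeleton: str) -> str:
--     return skeleton.replace('{idx}', '')
--
-- def header_port_order(bus_groups, scalars, port_dir) -> List[str]:
--     buses_in, buses_out, buses_io = [], [], []
--     for (direction, skeleton) in bus_groups.keys():
--         base = skeleton_to_busbase(skeleton)
--         if direction == 'input':
--             buses_in.append(base)
--         elif direction == 'output':
--             buses_out.append(base)
--         else:
--             buses_io.append(base)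
--     ordered = buses_in + buses_out + buses_io
--     # append scalars in original declaration encounter order
--     for nm, _dir in port_dir.items():
--         if nm in scalars:
--             ordered.append(nm)
--     # dedup preserve order
--     seen: Set[str] = set()
--     final: List[str] = []
--     for p in ordered:
--         if p not in seen:
--             final.append(p); seen.add(p)
--     return final
-- ===== SOURCE B (Python) =====
-- def skeleton_to_busbase(skeleton: str) -> str:
--     return skeleton.replace('{idx}', '')
--
-- def header_port_order(bus_groups, scalars, port_dir):
--     # One dict mapping each name to the smallest rank of any entry producing it
--     # (rank = priority * n + declaration index encodes "direction bucket, then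
--     # declaration order" as a single integer); the final order is one sort of
--     # the distinct names by that minimal rank.
--     n = len(bus_groups) + len(port_dir)
--     rank = {}
--     for i, (direction, skeleton) in enumerate(bus_groups):
--         pr = 0 if direction == 'input' else 1 if direction == 'output' else 2
--         nm = skeleton_to_busbase(skeleton)
--         r = pr * n + i
--         if nm not in rank or r < rank[nm]:
--             rank[nm] = r
--     for i, nm in enumerate(port_dir):
--         if nm in scalars:
--             r = 3 * n + i
--             if nm not in rank or r < rank[nm]:
--                 rank[nm] = r
--     return sorted(rank, key=rank.get)
-- ===== Notes on version B (the rewrite author's own statement) =====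
-- stated objective: alternative
-- what changed: Replaces A's three-bucket partition, list concatenation and seen-set dedup pass by a single per-name minimum-rank aggregation in one dict (rank = priority*n + declaration index) followed by one sort of the distinct names by that minimal rank.
import Mathlib
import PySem

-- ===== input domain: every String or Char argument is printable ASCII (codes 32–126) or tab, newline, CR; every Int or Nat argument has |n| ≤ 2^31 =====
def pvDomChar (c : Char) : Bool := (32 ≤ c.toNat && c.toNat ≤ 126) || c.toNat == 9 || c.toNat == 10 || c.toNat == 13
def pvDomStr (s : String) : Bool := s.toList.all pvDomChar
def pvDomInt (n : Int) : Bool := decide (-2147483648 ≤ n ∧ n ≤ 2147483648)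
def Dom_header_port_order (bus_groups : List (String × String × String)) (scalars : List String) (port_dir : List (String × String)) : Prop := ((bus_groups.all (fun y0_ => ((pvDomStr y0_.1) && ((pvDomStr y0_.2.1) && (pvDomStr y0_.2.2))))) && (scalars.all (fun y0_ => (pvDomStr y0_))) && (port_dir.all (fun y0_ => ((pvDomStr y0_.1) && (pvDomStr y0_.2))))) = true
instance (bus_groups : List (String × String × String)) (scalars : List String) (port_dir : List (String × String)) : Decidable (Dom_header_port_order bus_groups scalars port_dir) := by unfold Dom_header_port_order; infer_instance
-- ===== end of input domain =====

-- B replaces A's three-bucket partition + set-based dedup pass by one per-name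
-- minimum-rank dict (rank = priority*n + declaration index) and a single final
-- sort of the distinct names by minimal rank (objective: alternative).

-- ===== PORT A =====
def header_port_order (bus_groups : List (String × String × String)) (scalars : List String) (port_dir : List (String × String)) : List String :=
  let st := ((PySem.Dict.ofList (bus_groups.map (fun t => ((t.1, t.2.1), t.2.2)))).keys).foldl
    (fun (st : List String × List String × List String) k =>
      let base := PySem.Str.replace k.2 "{idx}" ""
      if k.1 == "input" then (st.1 ++ [base], st.2.1, st.2.2)
      else if k.1 == "output" then (st.1, st.2.1 ++ [base], st.2.2)
      else (st.1, st.2.1, st.2.2 ++ [base])) ([], [], [])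
  let ordered := st.1 ++ st.2.1 ++ st.2.2
  let ordered2 := (PySem.Dict.ofList port_dir).items.foldl
    (fun acc p => if scalars.contains p.1 then acc ++ [p.1] else acc) ordered
  (ordered2.foldl (fun (st : List String × PySem.Set String) p =>
      if st.2.contains p then st else (st.1 ++ [p], st.2.add p)) ([], PySem.Set.empty)).1

-- ===== PORT B =====
-- 'sorted(rank, key=rank.get)': every key of rank is present, so rank.get nm is the
-- stored Int; ported as getD nm 0 (the default is never read).
def header_port_order_alt (bus_groups : List (String × String × String)) (scalars : List String) (port_dir : List (String × String)) : List String :=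
  let busKeys := (PySem.Dict.ofList (bus_groups.map (fun t => ((t.1, t.2.1), t.2.2)))).keys
  let pdKeys := (PySem.Dict.ofList port_dir).keys
  let n : Int := busKeys.length + pdKeys.length
  let rank := (PySem.List.enumerate busKeys).foldl
    (fun (d : PySem.Dict String Int) p =>
      let pr : Int := if p.2.1 == "input" then 0 else if p.2.1 == "output" then 1 else 2
      let nm := PySem.Str.replace p.2.2 "{idx}" ""
      let r := pr * n + p.1
      -- 'nm not in rank or r < rank[nm]': the getD arm is only reached when nm is present
      if !(d.contains nm) || decide (r < d.getD nm 0) then d.insert nm r else d)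
    PySem.Dict.empty
  let rank2 := (PySem.List.enumerate pdKeys).foldl
    (fun (d : PySem.Dict String Int) p =>
      if scalars.contains p.2 then
        let r := 3 * n + p.1
        if !(d.contains p.2) || decide (r < d.getD p.2 0) then d.insert p.2 r else d
      else d)
    rank
  PySem.List.sorted rank2.keys (fun nm => rank2.getD nm 0) false

-- ===== PRECONDITION & SPEC =====
def Spec_header_port_order (bus_groups : List (String × String × String)) (scalars : List String) (port_dir : List (String × String)) (out : List String) : Prop := out = header_port_order_alt bus_groups scalars port_dir
instance (bus_groups : List (String × String × String)) (scalars : List String) (port_dir : List (String × String)) (out : List String) : Decidable (Spec_header_port_order bus_groups scalars port_dir out) := by unfold Spec_header_port_order; infer_instance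

-- ===== CLAIM (what is proved, stated in full; the proofs are below) =====
def Claim_equal_header_port_order : Prop := ∀ (bus_groups : List (String × String × String)) (scalars : List String) (port_dir : List (String × String)), Dom_header_port_order bus_groups scalars port_dir → Spec_header_port_order bus_groups scalars port_dir (header_port_order bus_groups scalars port_dir)

-- ===== LEMMAS AND PROOFS =====

-- B's loop body, abstracted over the already-computed (rank, name) pair
def pvStep (d : PySem.Dict String Int) (q : Int × String) : PySem.Dict String Int :=
  if !(d.contains q.2) || decide (q.1 < d.getD q.2 0) then d.insert q.2 q.1 else d

-- what pvStep does to the value stored at one fixed name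
def pvOStep (nm : String) (o : Option Int) (q : Int × String) : Option Int :=
  if q.2 = nm then some (match o with | none => q.1 | some v => min v q.1) else o

-- key of the first entry carrying a given name
def pvFK (L : List (Int × String)) (nm : String) : Int :=
  ((L.find? (fun p => p.2 == nm)).map (·.1)).getD 0

theorem pvStep_get? (d : PySem.Dict String Int) (q : Int × String) (nm : String) :
    (pvStep d q).get? nm = pvOStep nm (d.get? nm) q := by
  unfold pvStep pvOStep
  by_cases h : q.2 = nm
  · subst h
    rw [PySem.Dict.contains_eq_isSome_get?, PySem.Dict.getD_eq_get?_getD]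
    cases hd : d.get? q.2 with
    | none => simp [PySem.Dict.get?_insert_self]
    | some v =>
      by_cases hlt : q.1 < v
      · simp [hlt, min_eq_right (le_of_lt hlt)]
      · simp [hlt, hd, min_eq_left (le_of_not_gt hlt)]
  · by_cases hc : (!(d.contains q.2) || decide (q.1 < d.getD q.2 0)) = true
    · rw [if_pos hc, PySem.Dict.get?_insert, if_neg (fun hh => h hh.symm), if_neg h]
    · rw [if_neg hc, if_neg h]

theorem pvFold_get? (M : List (Int × String)) : ∀ (d : PySem.Dict String Int) (nm : String),
    (M.foldl pvStep d).get? nm = M.foldl (pvOStep nm) (d.get? nm) := by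
  induction M with
  | nil => intro d nm; rfl
  | cons q t ih => intro d nm; simp only [List.foldl_cons, ih, pvStep_get?]

theorem pvOStep_rcomm (nm : String) (o : Option Int) (q r : Int × String) :
    pvOStep nm (pvOStep nm o q) r = pvOStep nm (pvOStep nm o r) q := by
  unfold pvOStep
  by_cases hq : q.2 = nm <;> by_cases hr : r.2 = nm <;> simp [hq, hr]
  cases o with
  | none => simp [min_comm]
  | some v => simp [min_right_comm]

theorem pvOFold_stay (nm : String) (v : Int) : ∀ (M : List (Int × String)),
    (∀ q ∈ M, v < q.1) → M.foldl (pvOStep nm) (some v) = some v := by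
  intro M
  induction M with
  | nil => intro _; rfl
  | cons q t ih =>
    intro h
    have hq : v < q.1 := h q (by simp)
    have : pvOStep nm (some v) q = some v := by
      unfold pvOStep
      by_cases hqn : q.2 = nm <;> simp [hqn, min_eq_left (le_of_lt hq)]
    simp only [List.foldl_cons, this]
    exact ih (fun p hp => h p (by simp [hp]))

theorem pvOFold_find (nm : String) : ∀ (L : List (Int × String)),
    L.Pairwise (fun p q => p.1 < q.1) →
    L.foldl (pvOStep nm) none = (L.find? (fun p => p.2 == nm)).map (·.1) := by
  intro L
  induction L with
  | nil => intro _; rfl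
  | cons p t ih =>
    intro h
    rw [List.pairwise_cons] at h
    by_cases hp : p.2 = nm
    · have h1 : pvOStep nm none p = some p.1 := by unfold pvOStep; simp [hp]
      simp only [List.foldl_cons, h1, List.find?_cons, show (p.2 == nm) = true by simp [hp]]
      exact (pvOFold_stay nm p.1 t h.1).trans rfl
    · have h1 : pvOStep nm none p = none := by unfold pvOStep; simp [hp]
      simp only [List.foldl_cons, h1, List.find?_cons, show (p.2 == nm) = false by simp [hp]]
      exact ih h.2

theorem pvFold_nodup (M : List (Int × String)) : ∀ (d : PySem.Dict String Int),
    d.keys.Nodup → (M.foldl pvStep d).keys.Nodup := by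
  induction M with
  | nil => intro d h; exact h
  | cons q t ih =>
    intro d h
    simp only [List.foldl_cons]
    apply ih
    unfold pvStep
    split
    · exact PySem.Dict.nodup_keys_insert d q.2 q.1 h
    · exact h

theorem pvFold_mem_keys (M : List (Int × String)) : ∀ (d : PySem.Dict String Int) (nm : String),
    nm ∈ (M.foldl pvStep d).keys ↔ nm ∈ d.keys ∨ nm ∈ M.map (·.2) := by
  induction M with
  | nil => intro d nm; simp
  | cons q t ih =>
    intro d nm
    simp only [List.foldl_cons, ih, List.map_cons, List.mem_cons]
    constructor
    · rintro (hk | hm)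
      · unfold pvStep at hk
        by_cases hc : (!(d.contains q.2) || decide (q.1 < d.getD q.2 0)) = true
        · rw [if_pos hc] at hk
          rcases (PySem.Dict.mem_keys_insert d q.2 nm q.1).mp hk with h | h
          · exact Or.inr (Or.inl h)
          · exact Or.inl h
        · rw [if_neg hc] at hk; exact Or.inl hk
      · exact Or.inr (Or.inr hm)
    · rintro (hd | he | hm)
      · left
        unfold pvStep
        split
        · exact (PySem.Dict.mem_keys_insert d q.2 nm q.1).mpr (Or.inr hd)
        · exact hd
      · left
        unfold pvStep
        by_cases hc : (!(d.contains q.2) || decide (q.1 < d.getD q.2 0)) = true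
        · rw [if_pos hc]
          exact (PySem.Dict.mem_keys_insert d q.2 nm q.1).mpr (Or.inl he)
        · rw [if_neg hc]
          have : d.contains q.2 = true := by
            by_contra hnc
            simp only [Bool.not_eq_true] at hnc
            simp [hnc] at hc
          rw [he]
          exact (PySem.Dict.contains_iff_mem_keys d q.2).mp this
      · exact Or.inr hm

-- ordered dedup, one step at a time
theorem pvUpdate_skip (y : String) : ∀ (xs : List String) (s : PySem.Set String), y ∈ s →
    PySem.Set.update s xs = PySem.Set.update s (xs.filter (fun z => !(z == y))) := by
  intro xs
  induction xs with
  | nil => intro s _; rfl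
  | cons z t ih =>
    intro s hy
    by_cases hz : z = y
    · subst hz
      have hadd : PySem.Set.add s z = s := by
        unfold PySem.Set.add PySem.Set.contains
        simp [hy]
      simp only [PySem.Set.update, List.foldl_cons, List.filter_cons]
      rw [show (!(z == z)) = false by simp]
      simp only [Bool.false_eq_true, if_false]
      rw [hadd]
      exact ih s hy
    · have hmem : y ∈ PySem.Set.add s z := by
        unfold PySem.Set.add
        split <;> simp [hy]
      simp only [PySem.Set.update, List.foldl_cons, List.filter_cons,
        show (!(z == y)) = true by simp [hz]]
      exact ih (PySem.Set.add s z) hmem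

theorem pvUpdate_cons (a : String) : ∀ (l : List String) (s : PySem.Set String),
    (∀ z ∈ l, z ≠ a) → PySem.Set.update (a :: s) l = a :: PySem.Set.update s l := by
  intro l
  induction l with
  | nil => intro s _; rfl
  | cons z t ih =>
    intro s h
    have hz : z ≠ a := h z (by simp)
    have hcont : PySem.Set.contains (a :: s) z = PySem.Set.contains s z := by
      unfold PySem.Set.contains
      simp [hz]
    have hadd : PySem.Set.add (a :: s) z = a :: PySem.Set.add s z := by
      unfold PySem.Set.add
      rw [hcont]
      split <;> simp
    simp only [PySem.Set.update, List.foldl_cons, hadd]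
    exact ih (PySem.Set.add s z) (fun w hw => h w (by simp [hw]))

theorem pvDedup_cons (x : String) (xs : List String) :
    PySem.List.dedup (x :: xs) = x :: PySem.List.dedup (xs.filter (fun z => !(z == x))) := by
  have h1 : PySem.List.dedup (x :: xs) = PySem.Set.update [x] xs := by
    simp only [PySem.List.dedup_eq_ofList, PySem.Set.ofList_eq_foldl, List.foldl_cons]
    rfl
  have h2 : PySem.List.dedup (xs.filter (fun z => !(z == x))) =
      PySem.Set.update [] (xs.filter (fun z => !(z == x))) := by
    simp only [PySem.List.dedup_eq_ofList, PySem.Set.ofList_eq_foldl]; rfl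
  rw [h1, h2, pvUpdate_skip x xs [x] (by simp),
    pvUpdate_cons x _ ([] : List String) (by intro z hz; simpa using (List.of_mem_filter hz))]

theorem pvFind_filter {α : Type} (p q : α → Bool) : ∀ (l : List α),
    (∀ x ∈ l, p x = true → q x = true) → (l.filter q).find? p = l.find? p := by
  intro l
  induction l with
  | nil => intro _; rfl
  | cons x t ih =>
    intro h
    by_cases hq : q x = true
    · by_cases hp : p x = true
      · simp [hq, hp]
      · simp only [List.filter_cons, if_pos hq, List.find?_cons,
          show p x = false by simpa using hp]
        exact ih (fun y hy => h y (by simp [hy]))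
    · have hp : p x = false := by
        by_contra hc
        exact hq (h x (by simp) (by simpa using hc))
      simp only [List.filter_cons, if_neg hq, List.find?_cons, hp]
      exact ih (fun y hy => h y (by simp [hy]))

theorem pvDedup_pairwise : ∀ (n : Nat) (L : List (Int × String)), L.length ≤ n →
    L.Pairwise (fun p q => p.1 < q.1) →
    (PySem.List.dedup (L.map (·.2))).Pairwise (fun a b => pvFK L a < pvFK L b) := by
  intro n
  induction n with
  | zero =>
    intro L hL _
    rw [List.length_eq_zero_iff.mp (Nat.le_zero.mp hL)]
    simp [PySem.List.dedup]
  | succ n ih =>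
    intro L hL h
    cases L with
    | nil => simp [PySem.List.dedup]
    | cons p t =>
      rw [List.pairwise_cons] at h
      have hfilter : (t.map (·.2)).filter (fun z => !(z == p.2)) =
          (t.filter (fun q => !(q.2 == p.2))).map (·.2) := List.filter_map
      rw [List.map_cons, pvDedup_cons, hfilter]
      set t' := t.filter (fun q => !(q.2 == p.2)) with ht'
      have ht'asc : t'.Pairwise (fun p q => p.1 < q.1) :=
        List.Pairwise.sublist List.filter_sublist h.2
      have ht'len : t'.length ≤ n := by
        have h1 : t'.length ≤ t.length := List.length_filter_le _ _
        have h2 : t.length + 1 ≤ n + 1 := by simpa using hL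
        omega
      -- members of the tail: name ≠ p.2, and pvFK over p :: t agrees with pvFK over t'
      have hkey : ∀ b ∈ PySem.List.dedup (t'.map (·.2)),
          b ≠ p.2 ∧ pvFK (p :: t) b = pvFK t' b ∧ ∃ rb ∈ t', rb.2 = b ∧ pvFK t' b = rb.1 := by
        intro b hb
        have hbmem : b ∈ t'.map (·.2) := (PySem.List.mem_dedup _ _).mp hb
        obtain ⟨q, hq, hqb⟩ := List.mem_map.mp hbmem
        have hqne : (q.2 == p.2) = false := by
          have := List.of_mem_filter hq
          simpa using this
        have hbne : b ≠ p.2 := by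
          rw [← hqb]; intro hc; simp [hc] at hqne
        have hfind : (p :: t).find? (fun r => r.2 == b) = t'.find? (fun r => r.2 == b) := by
          rw [List.find?_cons_of_neg (by simp only [beq_iff_eq]; exact fun hh => hbne hh.symm),
            ht', pvFind_filter]
          intro x _ hx
          have hxb : x.2 = b := by simpa using hx
          simp [hxb, fun hh : b = p.2 => hbne hh]
        have hsome : (t'.find? (fun r => r.2 == b)).isSome = true := by
          rw [List.find?_isSome]
          exact ⟨q, hq, by simp [hqb]⟩
        obtain ⟨rb, hrb⟩ := Option.isSome_iff_exists.mp hsome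
        refine ⟨hbne, by simp [pvFK, hfind], rb, List.mem_of_find?_eq_some hrb, ?_, ?_⟩
        · have := List.find?_some hrb; simpa using this
        · simp [pvFK, hrb]
      constructor
      · intro b hb
        obtain ⟨hbne, hEq, rb, hrbmem, _, hrbval⟩ := hkey b hb
        have hhead : pvFK (p :: t) p.2 = p.1 := by
          simp [pvFK, List.find?_cons_of_pos]
        rw [hhead, hEq, hrbval]
        exact h.1 rb (List.mem_of_mem_filter hrbmem)
      · apply (ih t' ht'len ht'asc).imp_of_mem
        intro a b ha hb hr
        rw [(hkey a ha).2.1, (hkey b hb).2.1]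
        exact hr

-- A's three-bucket loop characterised by filters
theorem pvFoldA (ks : List (String × String)) :
    ∀ (i o io : List String),
    ks.foldl (fun (st : List String × List String × List String) k =>
      let base := PySem.Str.replace k.2 "{idx}" ""
      if k.1 == "input" then (st.1 ++ [base], st.2.1, st.2.2)
      else if k.1 == "output" then (st.1, st.2.1 ++ [base], st.2.2)
      else (st.1, st.2.1, st.2.2 ++ [base])) (i, o, io)
    = (i ++ (ks.filter (fun k => k.1 == "input")).map (fun k => PySem.Str.replace k.2 "{idx}" ""),
       o ++ (ks.filter (fun k => !(k.1 == "input") && k.1 == "output")).map (fun k => PySem.Str.replace k.2 "{idx}" ""),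
       io ++ (ks.filter (fun k => !(k.1 == "input") && !(k.1 == "output"))).map (fun k => PySem.Str.replace k.2 "{idx}" "")) := by
  induction ks with
  | nil => intro i o io; simp
  | cons k t ih =>
    intro i o io
    simp only [List.foldl_cons]
    by_cases h1 : (k.1 == "input") = true
    · rw [if_pos h1, ih]
      simp [h1]
    · by_cases h2 : (k.1 == "output") = true
      · rw [if_neg h1, if_pos h2, ih]
        simp [h1, h2]
      · rw [if_neg h1, if_neg h2, ih]
        simp [h1, h2]

-- A's dedup loop: with final = seen it is Set.update
theorem pvDedupA (xs : List String) :
    ∀ (s : List String),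
    xs.foldl (fun (st : List String × PySem.Set String) p =>
      if st.2.contains p then st else (st.1 ++ [p], st.2.add p)) (s, s)
    = (PySem.Set.update s xs, PySem.Set.update s xs) := by
  induction xs with
  | nil => intro s; simp [PySem.Set.update]
  | cons x t ih =>
    intro s
    simp only [List.foldl_cons]
    by_cases hc : PySem.Set.contains s x = true
    · have hadd : PySem.Set.add s x = s := if_pos hc
      rw [if_pos hc, ih s]
      simp [PySem.Set.update, List.foldl_cons, hadd]
    · have hadd : PySem.Set.add s x = s ++ [x] := if_neg hc
      rw [if_neg hc, hadd, ih (s ++ [x])]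
      simp [PySem.Set.update, List.foldl_cons, hadd]

theorem pvUpdate_nil (xs : List String) : PySem.Set.update [] xs = PySem.List.dedup xs := by
  simp only [PySem.List.dedup_eq_ofList, PySem.Set.ofList_eq_foldl]; rfl


-- the rank of one bus entry / one scalar entry (B's inline key computation, named)
def pvFB (n : Int) (p : Int × (String × String)) : Int × String :=
  ((if p.2.1 == "input" then (0:Int) else if p.2.1 == "output" then 1 else 2) * n + p.1,
   PySem.Str.replace p.2.2 "{idx}" "")

def pvFS (n : Int) (p : Int × String) : Int × String := (3 * n + p.1, p.2)

theorem pvLam1 (n : Int) :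
    (fun (d : PySem.Dict String Int) (p : Int × (String × String)) =>
      if (!d.contains (PySem.Str.replace p.2.2 "{idx}" "") ||
          decide ((if (p.2.1 == "input") = true then (0:Int) else if (p.2.1 == "output") = true then 1 else 2) * n + p.1 <
            d.getD (PySem.Str.replace p.2.2 "{idx}" "") 0)) = true
      then d.insert (PySem.Str.replace p.2.2 "{idx}" "")
        ((if (p.2.1 == "input") = true then (0:Int) else if (p.2.1 == "output") = true then 1 else 2) * n + p.1)
      else d)
    = fun d p => pvStep d (pvFB n p) := rfl

theorem pvLam2 (n : Int) (scalars : List String) :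
    (fun (d : PySem.Dict String Int) (p : Int × String) =>
      if scalars.contains p.2 = true then
        if (!d.contains p.2 || decide (3 * n + p.1 < d.getD p.2 0)) = true then d.insert p.2 (3 * n + p.1) else d
      else d)
    = fun d p => if scalars.contains p.2 = true then pvStep d (pvFS n p) else d := rfl

theorem header_port_order_eq (bus_groups : List (String × String × String)) (scalars : List String) (port_dir : List (String × String)) :
    header_port_order bus_groups scalars port_dir = header_port_order_alt bus_groups scalars port_dir := by
  unfold header_port_order header_port_order_alt
  dsimp only
  rw [pvFoldA]
  rw [PySem.List.foldl_append_if (fun p : String × String => scalars.contains p.1) (fun p => p.1)]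
  rw [show (([], PySem.Set.empty) : List String × PySem.Set String) = (([] : List String), ([] : List String)) from rfl, pvDedupA]
  simp only [List.nil_append]
  rw [pvUpdate_nil]
  set ks := (PySem.Dict.ofList (List.map (fun t => ((t.1, t.2.1), t.2.2)) bus_groups)).keys with hks
  set pdK := (PySem.Dict.ofList port_dir).keys with hpdK
  set n : Int := (ks.length : Int) + (pdK.length : Int) with hn
  rw [pvLam1 n, pvLam2 n scalars, ← List.foldl_map, ← List.foldl_filter, ← List.foldl_map,
    ← List.foldl_append]
  set e := PySem.List.enumerate ks with he
  set epd := PySem.List.enumerate pdK with hepd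
  set M := List.map (pvFB n) e ++ List.map (pvFS n) (List.filter (fun p => scalars.contains p.2) epd) with hM
  set f0 := e.filter (fun p => p.2.1 == "input") with hf0
  set f1 := e.filter (fun p => (p.2.1 == "output") && !(p.2.1 == "input")) with hf1
  set f2 := e.filter (fun p => !(p.2.1 == "output") && !(p.2.1 == "input")) with hf2
  set L := (f0 ++ f1 ++ f2).map (pvFB n) ++ List.map (pvFS n) (List.filter (fun p => scalars.contains p.2) epd) with hL
  -- index bounds from enumerate
  have hksb : ∀ p ∈ e, 0 ≤ p.1 ∧ p.1 < (ks.length : Int) := by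
    intro p hp
    rw [he, PySem.List.mem_enumerate_iff] at hp
    obtain ⟨k, hk, rfl⟩ := hp
    constructor
    · simp
    · simp; omega
  have hpdb : ∀ p ∈ epd, 0 ≤ p.1 ∧ p.1 < (pdK.length : Int) := by
    intro p hp
    rw [hepd, PySem.List.mem_enumerate_iff] at hp
    obtain ⟨k, hk, rfl⟩ := hp
    constructor
    · simp
    · simp; omega
  have hksn : (ks.length : Int) ≤ n ∧ 0 ≤ n := by
    constructor <;> omega
  -- M is a permutation of L
  have hpe : (f0 ++ f1 ++ f2).Perm e := by
    have hs1 : ((e.filter fun p => !(p.2.1 == "input")).filter (fun p => p.2.1 == "output")) = f1 :=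
      List.filter_filter
    have hs2 : ((e.filter fun p => !(p.2.1 == "input")).filter (fun p => !(p.2.1 == "output"))) = f2 :=
      List.filter_filter
    have hp2 : (f1 ++ f2).Perm (e.filter fun p => !(p.2.1 == "input")) := by
      rw [← hs1, ← hs2]
      exact List.filter_append_perm _ _
    rw [List.append_assoc]
    exact ((List.Perm.append_left f0 hp2).trans (List.filter_append_perm _ e))
  have hpermM : M.Perm L := by
    rw [hM, hL]
    exact ((hpe.symm).map (pvFB n)).append_right _
  -- keys of L are strictly increasing
  have hkey0 : ∀ a ∈ f0.map (pvFB n), 0 ≤ a.1 ∧ a.1 < n := by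
    intro a ha
    obtain ⟨p, hp, rfl⟩ := List.mem_map.mp ha
    have hq := List.of_mem_filter hp
    have hb := hksb p (List.mem_of_mem_filter hp)
    simp [pvFB, hq]
    omega
  have hkey1 : ∀ a ∈ f1.map (pvFB n), n ≤ a.1 ∧ a.1 < 2 * n := by
    intro a ha
    obtain ⟨p, hp, rfl⟩ := List.mem_map.mp ha
    have hq := List.of_mem_filter hp
    have hb := hksb p (List.mem_of_mem_filter hp)
    simp only [Bool.and_eq_true, Bool.not_eq_true'] at hq
    simp [pvFB, hq.1, hq.2]
    omega
  have hkey2 : ∀ a ∈ f2.map (pvFB n), 2 * n ≤ a.1 ∧ a.1 < 3 * n := by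
    intro a ha
    obtain ⟨p, hp, rfl⟩ := List.mem_map.mp ha
    have hq := List.of_mem_filter hp
    have hb := hksb p (List.mem_of_mem_filter hp)
    simp only [Bool.and_eq_true, Bool.not_eq_true'] at hq
    simp [pvFB, hq.1, hq.2]
    omega
  have hkey3 : ∀ a ∈ List.map (pvFS n) (List.filter (fun p => scalars.contains p.2) epd),
      3 * n ≤ a.1 := by
    intro a ha
    obtain ⟨p, hp, rfl⟩ := List.mem_map.mp ha
    have hb := hpdb p (List.mem_of_mem_filter hp)
    unfold pvFS
    simp only
    omega
  have hee : e.Pairwise (fun a b => a.1 < b.1) := by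
    rw [he]; exact PySem.List.pairwise_lt_enumerate ks 0
  have hepde : epd.Pairwise (fun (a b : Int × String) => a.1 < b.1) := by
    rw [hepd]; exact PySem.List.pairwise_lt_enumerate pdK 0
  have hw0 : (f0.map (pvFB n)).Pairwise (fun a b => a.1 < b.1) := by
    apply List.pairwise_map.mpr
    apply List.Pairwise.imp_of_mem ?_ (List.Pairwise.sublist List.filter_sublist hee)
    intro a b ha hb hr
    have hqa := List.of_mem_filter ha
    have hqb := List.of_mem_filter hb
    simp only [pvFB, hqa, hqb, if_true]
    omega
  have hw1 : (f1.map (pvFB n)).Pairwise (fun a b => a.1 < b.1) := by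
    apply List.pairwise_map.mpr
    apply List.Pairwise.imp_of_mem ?_ (List.Pairwise.sublist List.filter_sublist hee)
    intro a b ha hb hr
    have hqa := List.of_mem_filter ha
    have hqb := List.of_mem_filter hb
    simp only [Bool.and_eq_true, Bool.not_eq_true'] at hqa hqb
    simp only [pvFB, hqa.1, hqa.2, hqb.1, hqb.2, Bool.false_eq_true, if_false, if_true]
    omega
  have hw2 : (f2.map (pvFB n)).Pairwise (fun a b => a.1 < b.1) := by
    apply List.pairwise_map.mpr
    apply List.Pairwise.imp_of_mem ?_ (List.Pairwise.sublist List.filter_sublist hee)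
    intro a b ha hb hr
    have hqa := List.of_mem_filter ha
    have hqb := List.of_mem_filter hb
    simp only [Bool.and_eq_true, Bool.not_eq_true'] at hqa hqb
    simp only [pvFB, hqa.1, hqa.2, hqb.1, hqb.2, Bool.false_eq_true, if_false]
    omega
  have hw3 : ((List.filter (fun p => scalars.contains p.2) epd).map (pvFS n)).Pairwise
      (fun a b => a.1 < b.1) := by
    apply List.pairwise_map.mpr
    apply List.Pairwise.imp_of_mem ?_ (List.Pairwise.sublist List.filter_sublist hepde)
    intro a b _ _ hr
    simp only [pvFS]
    omega
  have hLasc : L.Pairwise (fun (a b : Int × String) => a.1 < b.1) := by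
    rw [hL, List.map_append, List.map_append, List.append_assoc, List.append_assoc]
    refine List.pairwise_append.mpr ⟨hw0, List.pairwise_append.mpr ⟨hw1,
      List.pairwise_append.mpr ⟨hw2, hw3, ?_⟩, ?_⟩, ?_⟩
    · intro a ha b hb
      have := hkey2 a ha
      have := hkey3 b hb
      omega
    · intro a ha b hb
      rcases List.mem_append.mp hb with hb | hb
      · have := hkey1 a ha
        have := hkey2 b hb
        omega
      · have := hkey1 a ha
        have := hkey3 b hb
        omega
    · intro a ha b hb
      rcases List.mem_append.mp hb with hb | hb
      · have := hkey0 a ha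
        have := hkey1 b hb
        omega
      rcases List.mem_append.mp hb with hb | hb
      · have := hkey0 a ha
        have := hkey2 b hb
        omega
      · have := hkey0 a ha
        have := hkey3 b hb
        omega
  -- the names of L, in order, are exactly A's ordered list
  have hmapbus : ∀ (P : (String × String) → Bool),
      ((e.filter (fun p => P p.2)).map (pvFB n)).map (·.2)
        = (ks.filter P).map (fun k => PySem.Str.replace k.2 "{idx}" "") := by
    intro P
    rw [List.map_map]
    show (e.filter (P ∘ Prod.snd)).map
      ((fun k : String × String => PySem.Str.replace k.2 "{idx}" "") ∘ Prod.snd) = _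
    rw [← List.map_map, ← List.filter_map, he, PySem.List.map_snd_enumerate]
  have hmapsc : ((List.filter (fun p => scalars.contains p.2) epd).map (pvFS n)).map (·.2)
      = List.map (fun p => p.1) (List.filter (fun p => scalars.contains p.1)
          (PySem.Dict.ofList port_dir).items) := by
    rw [List.map_map]
    show (epd.filter ((fun nm => scalars.contains nm) ∘ Prod.snd)).map Prod.snd = _
    rw [← List.filter_map, hepd, PySem.List.map_snd_enumerate, hpdK]
    show _ = ((PySem.Dict.ofList port_dir).items.filter
      ((fun nm => scalars.contains nm) ∘ Prod.fst)).map Prod.fst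
    rw [← List.filter_map]
    rfl
  have hord : L.map (·.2) =
      List.map (fun k => PySem.Str.replace k.2 "{idx}" "") (List.filter (fun k => k.1 == "input") ks) ++
        (List.map (fun k => PySem.Str.replace k.2 "{idx}" "")
          (List.filter (fun k => !(k.1 == "input") && k.1 == "output") ks) ++
          (List.map (fun k => PySem.Str.replace k.2 "{idx}" "")
            (List.filter (fun k => !(k.1 == "input") && !(k.1 == "output")) ks) ++
            List.map (fun p => p.1) (List.filter (fun p => scalars.contains p.1)
              (PySem.Dict.ofList port_dir).items))) := by
    rw [hL]
    simp only [List.map_append]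
    rw [hf0, hf1, hf2, hmapbus (fun k => k.1 == "input"),
      hmapbus (fun k => (k.1 == "output") && !(k.1 == "input")),
      hmapbus (fun k => !(k.1 == "output") && !(k.1 == "input")), hmapsc,
      List.append_assoc, List.append_assoc]
    congr 2
    · congr 1
      exact List.filter_congr (fun x _ => Bool.and_comm _ _)
    · congr 2
      exact List.filter_congr (fun x _ => Bool.and_comm _ _)
  rw [show ∀ (a b c d : List String), a ++ b ++ c ++ d = a ++ (b ++ (c ++ d)) by
    intro a b c d; simp [List.append_assoc], ← hord]
  -- finish: the sorted keys of the min-rank dict are exactly the deduped names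
  have hv : ∀ nm, (M.foldl pvStep PySem.Dict.empty).getD nm 0 = pvFK L nm := by
    intro nm
    rw [PySem.Dict.getD_eq_get?_getD, pvFold_get?, PySem.Dict.get?_empty,
      hpermM.foldl_eq' (fun x _ y _ z => pvOStep_rcomm nm z x y) none,
      pvOFold_find nm L hLasc]
    rfl
  refine (PySem.List.sorted_eq_of_perm_of_pairwise_lt _ _ _ ?_ ?_).symm
  · refine (List.perm_ext_iff_of_nodup (PySem.List.nodup_dedup _)
      (pvFold_nodup M PySem.Dict.empty PySem.Dict.nodup_keys_empty)).mpr ?_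
    intro a
    have h1 : a ∈ M.map (·.2) ↔ a ∈ L.map (·.2) := (hpermM.map (·.2)).mem_iff
    have hke : (PySem.Dict.empty : PySem.Dict String Int).keys = [] := rfl
    rw [PySem.List.mem_dedup, pvFold_mem_keys, hke]
    simp only [List.not_mem_nil, false_or]
    exact h1.symm
  · exact (pvDedup_pairwise L.length L le_rfl hLasc).imp (fun {a b} hr => by
      rw [hv a, hv b]; exact hr)

-- ===== VERDICT (by name: the statement is the Claim_ definition above) =====
theorem header_port_order_spec : Claim_equal_header_port_order := by
  intro bus_groups scalars port_dir _
  unfold Spec_header_port_order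
  exact header_port_order_eq bus_groups scalars port_dir
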